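-- pv_equiv track=rewrite | github.com/myxu95/PRISM_PMF | forcefield/openff.py | _extract_atomtypes_content
-- ===== SOURCE A (Python) =====
-- def _extract_atomtypes_content(top_content):
--     """Extract atomtypes section from topology"""
--     lines = top_content.split("\n")
--     atomtypes_lines = []
--     in_section = False
--
--     for line in lines:
--         stripped = line.strip()
--         if stripped.startswith("[ atomtypes ]"):
--             in_section = True
--             atomtypes_lines.append(line)
--         elif stripped.startswith("[") and in_section:
--             in_section = False
--         elif in_section:
--             atomtypes_lines.append(line)
--
--     return "\n".join(atomtypes_lines)
-- ===== SOURCE B (Python) =====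
-- def _extract_atomtypes_content(top_content):
--     """Extract atomtypes section from topology (group-then-filter-then-flatten)."""
--     lines = top_content.split("\n")
--     blocks = []
--     cur = None
--     for line in lines:
--         if line.strip().startswith("["):
--             if cur is not None:
--                 blocks.append(cur)
--             cur = [line]
--         elif cur is not None:
--             cur.append(line)
--     if cur is not None:
--         blocks.append(cur)
--     kept = [b for b in blocks if b[0].strip().startswith("[ atomtypes ]")]
--     return "\n".join([line for b in kept for line in b])
-- ===== Notes on version B (the rewrite author's own statement) =====
-- stated objective: alternative
-- what changed: Replaced A's flag-based single scan with a group-then-filter-then-flatten decomposition: lines are grouped into blocks each starting at a section-header line (pre-header lines discarded), only blocks whose header line begins the atomtypes section are kept, and the kept blocks are concatenated and joined.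
import Mathlib
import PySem

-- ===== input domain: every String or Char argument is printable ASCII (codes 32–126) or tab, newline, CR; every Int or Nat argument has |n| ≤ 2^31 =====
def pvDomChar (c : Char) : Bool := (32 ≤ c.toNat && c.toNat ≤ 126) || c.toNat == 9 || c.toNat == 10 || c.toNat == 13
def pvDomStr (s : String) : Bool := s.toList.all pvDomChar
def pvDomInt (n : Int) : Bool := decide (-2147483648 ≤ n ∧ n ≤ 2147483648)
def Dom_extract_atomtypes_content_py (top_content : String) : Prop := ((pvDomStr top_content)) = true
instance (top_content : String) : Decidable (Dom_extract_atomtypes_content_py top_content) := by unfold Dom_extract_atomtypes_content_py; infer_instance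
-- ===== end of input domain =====

-- B replaces A's flag-based single scan by a group-into-blocks / filter-by-header / flatten decomposition (objective: alternative, same cost).

-- ===== PORT A =====
-- the for-loop of A: state = (accumulated lines, in_section flag)
def pvLoopA : List String → List String → Bool → List String
  | [], acc, _ => acc
  | line :: ls, acc, in_section =>
    let stripped := PySem.Str.strip line
    if PySem.Str.startswith stripped "[ atomtypes ]" then pvLoopA ls (acc ++ [line]) true
    else if PySem.Str.startswith stripped "[" && in_section then pvLoopA ls acc false
    else if in_section then pvLoopA ls (acc ++ [line]) true
    else pvLoopA ls acc in_section

def extract_atomtypes_content_py (top_content : String) : String :=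
  PySem.Str.join "\n" (pvLoopA ((PySem.Str.split? top_content "\n").getD []) [] false)

-- ===== PORT B =====
def pvIsHeader (l : String) : Bool := PySem.Str.startswith (PySem.Str.strip l) "["
def pvIsAtom (l : String) : Bool := PySem.Str.startswith (PySem.Str.strip l) "[ atomtypes ]"

-- the grouping loop of B: `cur` is the block under construction (None before the first header);
-- finished blocks are emitted in order (Python appends cur to blocks at the next header / at the end)
def pvGroupB : List String → Option (List String) → List (List String)
  | [], none => []
  | [], some c => [c]
  | line :: ls, cur =>
    if pvIsHeader line then cur.toList ++ pvGroupB ls (some [line])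
    else match cur with
      | none => pvGroupB ls none
      | some c => pvGroupB ls (some (c ++ [line]))

def extract_atomtypes_content_py_alt (top_content : String) : String :=
  PySem.Str.join "\n"
    (((pvGroupB ((PySem.Str.split? top_content "\n").getD []) none).filter
        (fun b => pvIsAtom (b.headD ""))).flatten)

-- ===== PRECONDITION & SPEC =====
def Spec_extract_atomtypes_content_py (top_content : String) (out : String) : Prop := out = extract_atomtypes_content_py_alt top_content
instance (top_content : String) (out : String) : Decidable (Spec_extract_atomtypes_content_py top_content out) := by unfold Spec_extract_atomtypes_content_py; infer_instance

-- ===== CLAIM (what is proved, stated in full; the proofs are below) =====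
def Claim_equal_extract_atomtypes_content_py : Prop := ∀ (top_content : String), Dom_extract_atomtypes_content_py top_content → Spec_extract_atomtypes_content_py top_content (extract_atomtypes_content_py top_content)

-- ===== LEMMAS AND PROOFS =====

-- the lines B keeps, given the block list
def pvSel (bs : List (List String)) : List String :=
  (bs.filter (fun b => pvIsAtom (b.headD ""))).flatten

theorem pvSel_nil : pvSel [] = [] := rfl

theorem pvSel_cons (c : List String) (bs : List (List String)) :
    pvSel (c :: bs) = (if pvIsAtom (c.headD "") = true then c else []) ++ pvSel bs := by
  unfold pvSel
  rw [List.filter_cons]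
  cases h : pvIsAtom (c.headD "") with
  | true => simp only [if_true, List.flatten_cons]
  | false => simp only [Bool.false_eq_true, if_false, List.nil_append]

theorem pvAtom_isHeader {l : String} (h : pvIsAtom l = true) : pvIsHeader l = true := by
  unfold pvIsAtom at h
  unfold pvIsHeader
  simp only [PySem.Str.startswith_eq, PySem.Chars.startswith_iff] at h ⊢
  exact List.IsPrefix.trans (by decide) h

theorem pvHeadD_append (c : List String) (l d : String) (hc : c ≠ []) :
    (c ++ [l]).headD d = c.headD d := by
  cases c with
  | nil => exact absurd rfl hc
  | cons a t => rfl

-- the three-state invariant tying A's scan to B's grouping: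
-- state false/none, state true with current atomtypes block c, state false with current non-atomtypes block c
theorem pvLoop_inv (ls : List String) :
    (∀ acc, pvLoopA ls acc false = acc ++ pvSel (pvGroupB ls none)) ∧
    (∀ acc c, c ≠ [] → pvIsAtom (c.headD "") = true →
        pvLoopA ls (acc ++ c) true = acc ++ pvSel (pvGroupB ls (some c))) ∧
    (∀ acc c, c ≠ [] → pvIsAtom (c.headD "") = false →
        pvLoopA ls acc false = acc ++ pvSel (pvGroupB ls (some c))) := by
  induction ls with
  | nil =>
    refine ⟨fun acc => by simp [pvLoopA, pvGroupB, pvSel_nil], ?_, ?_⟩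
    · intro acc c hc hA
      show acc ++ c = acc ++ pvSel [c]
      rw [pvSel_cons, pvSel_nil, hA]
      simp
    · intro acc c hc hA
      show acc = acc ++ pvSel [c]
      rw [pvSel_cons, pvSel_nil, hA]
      simp
  | cons l ls ih =>
    obtain ⟨ih1, ih2, ih3⟩ := ih
    by_cases hA : pvIsAtom l = true
    · have hH : pvIsHeader l = true := pvAtom_isHeader hA
      have hAtop : pvIsAtom (([l] : List String).headD "") = true := hA
      refine ⟨?_, ?_, ?_⟩
      · intro acc
        simp only [pvLoopA, pvGroupB]
        rw [show (PySem.Str.startswith (PySem.Str.strip l) "[ atomtypes ]") = pvIsAtom l from rfl, hA]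
        simp only [if_true, hH, Option.toList, List.nil_append]
        exact ih2 acc [l] (by simp) hAtop
      · intro acc c hc hcA
        simp only [pvLoopA, pvGroupB]
        rw [show (PySem.Str.startswith (PySem.Str.strip l) "[ atomtypes ]") = pvIsAtom l from rfl, hA]
        simp only [if_true, hH, Option.toList, List.singleton_append]
        have := ih2 (acc ++ c) [l] (by simp) hAtop
        rw [List.append_assoc] at this ⊢
        rw [this, pvSel_cons, hcA]
        simp
      · intro acc c hc hcA
        simp only [pvLoopA, pvGroupB]
        rw [show (PySem.Str.startswith (PySem.Str.strip l) "[ atomtypes ]") = pvIsAtom l from rfl, hA]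
        simp only [if_true, hH, Option.toList, List.singleton_append]
        rw [ih2 acc [l] (by simp) hAtop, pvSel_cons, hcA]
        simp
    · replace hA : pvIsAtom l = false := by simpa using hA
      by_cases hH : pvIsHeader l = true
      · have hnewA : pvIsAtom (([l] : List String).headD "") = false := hA
        refine ⟨?_, ?_, ?_⟩
        · intro acc
          simp only [pvLoopA, pvGroupB]
          rw [show (PySem.Str.startswith (PySem.Str.strip l) "[ atomtypes ]") = pvIsAtom l from rfl, hA]
          rw [show (PySem.Str.startswith (PySem.Str.strip l) "[") = pvIsHeader l from rfl, hH]
          simp only [Bool.false_eq_true, if_false, if_true, Option.toList, List.nil_append]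
          exact ih3 acc [l] (by simp) hnewA
        · intro acc c hc hcA
          simp only [pvLoopA, pvGroupB]
          rw [show (PySem.Str.startswith (PySem.Str.strip l) "[ atomtypes ]") = pvIsAtom l from rfl, hA]
          rw [show (PySem.Str.startswith (PySem.Str.strip l) "[") = pvIsHeader l from rfl, hH]
          simp only [Bool.false_eq_true, if_false, Bool.true_and, if_true, Option.toList,
            List.singleton_append]
          have := ih3 (acc ++ c) [l] (by simp) hnewA
          rw [this, pvSel_cons, hcA]
          simp
        · intro acc c hc hcA
          simp only [pvLoopA, pvGroupB]
          rw [show (PySem.Str.startswith (PySem.Str.strip l) "[ atomtypes ]") = pvIsAtom l from rfl, hA]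
          rw [show (PySem.Str.startswith (PySem.Str.strip l) "[") = pvIsHeader l from rfl, hH]
          simp only [Bool.false_eq_true, if_false, Bool.and_false, Option.toList,
            List.singleton_append, reduceIte]
          rw [ih3 acc [l] (by simp) hnewA, pvSel_cons, hcA]
          simp
      · replace hH : pvIsHeader l = false := by simpa using hH
        refine ⟨?_, ?_, ?_⟩
        · intro acc
          simp only [pvLoopA, pvGroupB]
          rw [show (PySem.Str.startswith (PySem.Str.strip l) "[ atomtypes ]") = pvIsAtom l from rfl, hA]
          rw [show (PySem.Str.startswith (PySem.Str.strip l) "[") = pvIsHeader l from rfl, hH]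
          simp only [Bool.false_eq_true, if_false, Bool.false_and]
          exact ih1 acc
        · intro acc c hc hcA
          simp only [pvLoopA, pvGroupB]
          rw [show (PySem.Str.startswith (PySem.Str.strip l) "[ atomtypes ]") = pvIsAtom l from rfl, hA]
          rw [show (PySem.Str.startswith (PySem.Str.strip l) "[") = pvIsHeader l from rfl, hH]
          simp only [Bool.false_eq_true, if_false, Bool.false_and, if_true]
          have hc' : c ++ [l] ≠ [] := by simp
          have hcA' : pvIsAtom ((c ++ [l]).headD "") = true := by
            rw [pvHeadD_append c l "" hc]; exact hcA
          have := ih2 acc (c ++ [l]) hc' hcA'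
          rw [← List.append_assoc] at this
          exact this
        · intro acc c hc hcA
          simp only [pvLoopA, pvGroupB]
          rw [show (PySem.Str.startswith (PySem.Str.strip l) "[ atomtypes ]") = pvIsAtom l from rfl, hA]
          rw [show (PySem.Str.startswith (PySem.Str.strip l) "[") = pvIsHeader l from rfl, hH]
          simp only [Bool.false_eq_true, if_false, Bool.false_and]
          have hcA' : pvIsAtom ((c ++ [l]).headD "") = false := by
            rw [pvHeadD_append c l "" hc]; exact hcA
          exact ih3 acc (c ++ [l]) (by simp) hcA'

-- ===== VERDICT (by name: the statement is the Claim_ definition above) =====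
theorem extract_atomtypes_content_py_spec : Claim_equal_extract_atomtypes_content_py := by
  intro top_content _
  unfold Spec_extract_atomtypes_content_py extract_atomtypes_content_py extract_atomtypes_content_py_alt
  rw [(pvLoop_inv ((PySem.Str.split? top_content "\n").getD [])).1 []]
  rfl
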